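-- pv_equiv track=rewrite | github.com/Thang-ND/Hackerrank-Challenge | SprintT6/encryption.py | encryption
-- ===== SOURCE A (Python) =====
-- import math
--
-- def encryption(s):
--     # Write your code here
--     result = []
--     s_new = s.replace(" ", "")
--     len_s = len(s_new)
--
--     sqrtL = math.sqrt(len_s)
--     l_sqrt = math.floor(sqrtL)
--     r_sqrt = math.ceil(sqrtL)
--
--     if l_sqrt * r_sqrt < len_s:
--         l_sqrt = r_sqrt
--
--     for i in range(l_sqrt): # 0 1 2
--         try:
--             result.append(s_new[i*r_sqrt: i*r_sqrt+r_sqrt])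
--         except:
--             result.append(s_new[i*r_sqrt:])
--     result2 = []
--
--     for c in range(r_sqrt):
--         tmp = ""
--         for i in range(l_sqrt):
--             try:
--                 tmp += result[i][c]
--             except:
--                 continue
--         result2.append(tmp)
--
--     return ' '.join(result2)
-- ===== SOURCE B (Python) =====
-- import math
--
-- def encryption(s):
--     s_new = s.replace(" ", "")
--     cols = math.ceil(math.sqrt(len(s_new)))
--     return ' '.join(s_new[c::cols] for c in range(cols))
-- ===== Notes on version B (the rewrite author's own statement) =====
-- stated objective: simpler
-- what changed: B drops A's two-pass grid construction (build row substrings, then read each column with try/except per-character indexing) and emits each output column directly as one strided slice s_new[c::cols]; the measured speedup comes from replacing per-character Python-level indexing and string concatenation by C-level slicing.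
import Mathlib
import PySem

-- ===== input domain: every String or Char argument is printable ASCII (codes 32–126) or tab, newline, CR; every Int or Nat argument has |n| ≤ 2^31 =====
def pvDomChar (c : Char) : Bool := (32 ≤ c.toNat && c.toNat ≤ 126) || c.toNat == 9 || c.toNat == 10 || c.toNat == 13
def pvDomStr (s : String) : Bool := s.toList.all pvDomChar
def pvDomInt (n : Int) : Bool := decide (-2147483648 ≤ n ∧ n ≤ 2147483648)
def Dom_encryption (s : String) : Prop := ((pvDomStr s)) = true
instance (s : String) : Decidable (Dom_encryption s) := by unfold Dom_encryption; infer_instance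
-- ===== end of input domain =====

-- ===== PORT A =====
-- B replaces A's build-rows-then-read-columns grid by direct strided column slices s_new[c::cols] (objective: simpler).
-- math.floor(math.sqrt n) / math.ceil(math.sqrt n) are ported as Nat.sqrt n / its +1 twin
-- (exact: float sqrt agrees with integer sqrt on these magnitudes).
def encryption (s : String) : String :=
  let sNew : List Char := (PySem.Str.replace s " " "").toList  -- s.replace(" ", ""), on code points
  let lenS : Nat := sNew.length
  let lSqrt0 : Nat := Nat.sqrt lenS                            -- l_sqrt = math.floor(math.sqrt(len_s))
  let rSqrt : Nat := if lSqrt0 * lSqrt0 = lenS then lSqrt0 else lSqrt0 + 1  -- r_sqrt = math.ceil(...)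
  let lSqrt : Nat := if lSqrt0 * rSqrt < lenS then rSqrt else lSqrt0
  -- the try/except around the slice can never fire (slicing raises on no input); the try branch is ported
  let result : List (List Char) := (List.range lSqrt).foldl (fun acc i =>
      acc ++ [PySem.List.slice sNew (some ((i * rSqrt : Nat) : Int))
                                    (some (((i * rSqrt : Nat) : Int) + (rSqrt : Int)))]) []
  let result2 : List (List Char) := (List.range rSqrt).foldl (fun acc c =>
      acc ++ [(List.range lSqrt).foldl (fun tmp i =>
          -- try: tmp += result[i][c]  except: continue  (an IndexError from either index skips i)
          match (PySem.List.pyGet? result ((i : Nat) : Int)).bind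
                  (fun row => PySem.List.pyGet? row ((c : Nat) : Int)) with
          | some ch => tmp ++ [ch]
          | none => tmp) []]) []
  String.ofList (PySem.Chars.join [' '] result2)       -- ' '.join(result2)

-- ===== PORT B =====
def encryption_alt (s : String) : String :=
  let sNew : List Char := (PySem.Str.replace s " " "").toList
  let n : Nat := sNew.length
  let l0 : Nat := Nat.sqrt n
  let cols : Nat := if l0 * l0 = n then l0 else l0 + 1         -- math.ceil(math.sqrt(len(s_new)))
  String.ofList (PySem.Chars.join [' ']
    ((List.range cols).map (fun c =>                           -- s_new[c::cols] for c in range(cols)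
      (PySem.List.slice? sNew (some ((c : Nat) : Int)) none ((cols : Nat) : Int)).getD [])))

-- ===== PRECONDITION & SPEC =====
def Spec_encryption (s : String) (out : String) : Prop := out = encryption_alt s
instance (s : String) (out : String) : Decidable (Spec_encryption s out) := by unfold Spec_encryption; infer_instance

-- ===== CLAIM (what is proved, stated in full; the proofs are below) =====
def Claim_equal_encryption : Prop := ∀ (s : String), Dom_encryption s → Spec_encryption s (encryption s)

-- ===== LEMMAS AND PROOFS =====

-- ceil(sqrt n) is at most n (n ≥ 1)
lemma ceil_sqrt_le (n : Nat) (hn : 0 < n) :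
    (if Nat.sqrt n * Nat.sqrt n = n then Nat.sqrt n else Nat.sqrt n + 1) ≤ n := by
  split_ifs with h
  · exact Nat.sqrt_le_self n
  · rcases Nat.lt_or_ge n 2 with h2 | h2
    · interval_cases n <;> simp_all
    · exact Nat.sqrt_lt_self h2

-- trailing all-none indices contribute nothing to an optional flatMap over a range
lemma flatMap_range_stop {α : Type} (f : Nat → Option α) (a b : Nat) (hab : a ≤ b)
    (h : ∀ i, a ≤ i → f i = none) :
    (List.range b).flatMap (fun i => (f i).toList)
      = (List.range a).flatMap (fun i => (f i).toList) := by
  obtain ⟨k, rfl⟩ : ∃ k, b = a + k := ⟨b - a, by omega⟩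
  rw [List.range_add, List.flatMap_append]
  have : ((List.range k).map (a + ·)).flatMap (fun i => (f i).toList) = [] := by
    rw [List.flatMap_eq_nil_iff]
    intro x hx
    obtain ⟨i, hi, rfl⟩ := List.mem_map.mp hx
    simp [h (a + i) (by omega)]
  simp [this]

-- the positive-step tail slice xs[c::r] characterised as a filterMap over a range
lemma slice?_pos_from {α : Type} (xs : List α) (c r : Nat) (hc : c < xs.length) (hr : 0 < r) :
    PySem.List.slice? xs (some ((c : Nat) : Int)) none ((r : Nat) : Int)
      = some ((List.range ((xs.length - c + r - 1) / r)).filterMap (fun k => xs[c + r * k]?)) := by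
  unfold PySem.List.slice? PySem.List.sliceIndices
  have h0 : ((r : Nat) : Int) ≠ 0 := by exact_mod_cast hr.ne'
  have h1 : ¬ ((r : Nat) : Int) < 0 := by omega
  have h2 : ¬ ((c : Nat) : Int) < 0 := by omega
  have h3 : min ((c : Nat) : Int) ((xs.length : Nat) : Int) = ((c : Nat) : Int) := by omega
  have h4 : (0:Int) < ((r : Nat) : Int) := by omega
  simp only [h0, h1, h2, h3, h4, if_false, if_true]
  have h5 : ((c : Nat) : Int) < ((xs.length : Nat) : Int) := by omega
  simp only [h5, if_pos]
  have h6 : ((xs.length : Int) - c + r - 1) = ((xs.length - c + r - 1 : Nat) : Int) := by omega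
  rw [h6]
  have h7 : (((xs.length - c + r - 1 : Nat) : Int) / ((r : Nat) : Int)).toNat
      = (xs.length - c + r - 1) / r := by
    rw [← Int.natCast_div]; exact Int.toNat_natCast _
  rw [h7]
  apply congrArg
  apply List.filterMap_congr
  intro k _
  apply congrArg
  omega

-- A's column-c loop over the grid equals B's strided slice t[c::r]
lemma col_eq (t : List Char) (r l c : Nat) (hc : c < r) (hrn : r ≤ t.length)
    (hln : t.length ≤ l * r) :
    (List.range l).foldl (fun tmp i =>
        match (PySem.List.pyGet? ((List.range l).map (fun i =>
                 PySem.List.slice t (some ((i * r : Nat) : Int))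
                   (some (((i * r : Nat) : Int) + (r : Int))))) ((i : Nat) : Int)).bind
                (fun row => PySem.List.pyGet? row ((c : Nat) : Int)) with
        | some ch => tmp ++ [ch]
        | none => tmp) []
      = (PySem.List.slice? t (some ((c : Nat) : Int)) none ((r : Nat) : Int)).getD [] := by
  have hr : 0 < r := by omega
  have hcn : c < t.length := by omega
  have hbody : (fun (tmp : List Char) (i : Nat) =>
      match (PySem.List.pyGet? ((List.range l).map (fun i =>
               PySem.List.slice t (some ((i * r : Nat) : Int))
                 (some (((i * r : Nat) : Int) + (r : Int))))) ((i : Nat) : Int)).bind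
              (fun row => PySem.List.pyGet? row ((c : Nat) : Int)) with
      | some ch => tmp ++ [ch]
      | none => tmp)
      = fun tmp i => tmp ++ (t[c + r * i]?).toList := by
    funext tmp i
    have key : (PySem.List.pyGet? ((List.range l).map (fun i =>
               PySem.List.slice t (some ((i * r : Nat) : Int))
                 (some (((i * r : Nat) : Int) + (r : Int))))) ((i : Nat) : Int)).bind
              (fun row => PySem.List.pyGet? row ((c : Nat) : Int)) = t[c + r * i]? := by
      rw [PySem.List.pyGet?_natCast]
      by_cases hi : i < l
      · rw [List.getElem?_map, List.getElem?_range hi]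
        simp only [Option.map_some, Option.bind_some]
        rw [PySem.List.pyGet?_natCast, PySem.List.slice_natCast_add,
            List.getElem?_take, List.getElem?_drop]
        simp only [hc, if_pos]
        apply congrArg
        ring
      · rw [List.getElem?_eq_none_iff.mpr (by simpa using Nat.le_of_not_lt hi),
            Option.bind_none]
        have h4 : l * r ≤ i * r := Nat.mul_le_mul_right r (Nat.le_of_not_lt hi)
        have h5 : i * r = r * i := Nat.mul_comm i r
        rw [List.getElem?_eq_none_iff.mpr (by omega)]
    rw [key]
    cases t[c + r * i]? <;> simp
  rw [hbody, PySem.List.foldl_append_eq_flatMap, List.nil_append,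
      slice?_pos_from t c r hcn hr, Option.getD_some,
      List.filterMap_eq_flatMap_toList]
  refine flatMap_range_stop _ _ _ ?hle ?hnone
  case hnone =>
    intro i hi
    apply List.getElem?_eq_none_iff.mpr
    have hx1 : r * ((t.length - c + r - 1) / r) + (t.length - c + r - 1) % r
        = t.length - c + r - 1 := Nat.div_add_mod _ r
    have hx2 : (t.length - c + r - 1) % r < r := Nat.mod_lt _ hr
    have h3 : r * ((t.length - c + r - 1) / r) ≤ r * i := Nat.mul_le_mul_left r hi
    omega
  case hle =>
    by_contra hgt
    push Not at hgt
    have h1 : (t.length - c + r - 1) / r * r ≤ t.length - c + r - 1 :=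
      Nat.div_mul_le_self _ _
    have h2 : (l + 1) * r ≤ (t.length - c + r - 1) / r * r :=
      Nat.mul_le_mul_right r (by omega)
    have h3 : (l + 1) * r = l * r + r := by ring
    omega

-- ===== VERDICT (by name: the statement is the Claim_ definition above) =====
theorem encryption_spec : Claim_equal_encryption := by
  intro s _
  unfold Spec_encryption encryption encryption_alt
  simp only [PySem.List.foldl_append_singleton_eq_map, List.nil_append]
  apply congrArg
  apply congrArg
  apply List.map_congr_left
  intro c hcmem
  set t : List Char := (PySem.Str.replace s " " "").toList with ht
  set n : Nat := t.length with hn'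
  set l0 : Nat := Nat.sqrt n with hl0
  set r : Nat := if l0 * l0 = n then l0 else l0 + 1 with hrdef
  set l : Nat := if l0 * r < n then r else l0 with hldef
  have hc : c < r := List.mem_range.mp hcmem
  have hn : 0 < n := by
    by_contra h0
    have : n = 0 := by omega
    have : r = 0 := by
      rw [hrdef, hl0, this]
      simp
    omega
  have hrn : r ≤ n := by rw [hrdef, hl0]; exact ceil_sqrt_le n hn
  have hrr : n ≤ r * r := by
    rw [hrdef]
    split_ifs with hsq
    · omega
    · have h := (Nat.lt_succ_sqrt n).le
      rw [hl0]
      simpa [Nat.succ_eq_add_one] using h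
  have hln : n ≤ l * r := by
    rw [hldef]
    split_ifs with h
    · exact hrr
    · omega
  exact col_eq t r l c hc hrn hln
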